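-- pv_equiv track=rewrite | github.com/keithcreelman/upsmflproduction | pipelines/etl/scripts/build_rostered_players_lineage.py | detect_load_shape
-- ===== SOURCE A (Python) =====
-- def safe_str(x) -> str:
--     return "" if x is None else str(x).strip()
--
-- def detect_load_shape(year_values: list, contract_status: str) -> str:
--     """BL/FL/FLAT/RESTRUCTURE based on year salary pattern."""
--     cs = safe_str(contract_status).upper()
--     if cs == "BL":
--         return "BL"
--     if cs == "FL":
--         return "FL"
--     yv = [y["salary"] for y in year_values]
--     if not yv:
--         return "UNKNOWN"
--     if len(yv) == 1 or all(s == yv[0] for s in yv):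
--         return "FLAT"
--     if all(yv[i + 1] > yv[i] for i in range(len(yv) - 1)):
--         return "BL"
--     if all(yv[i + 1] < yv[i] for i in range(len(yv) - 1)):
--         return "FL"
--     return "RESTRUCTURE"
-- ===== SOURCE B (Python) =====
-- def detect_load_shape(year_values: list, contract_status: str) -> str:
--     """BL/FL/FLAT/RESTRUCTURE: one pass collecting the set of comparison signs."""
--     cs = ("" if contract_status is None else str(contract_status).strip()).upper()
--     if cs == "BL":
--         return "BL"
--     if cs == "FL":
--         return "FL"
--     if not year_values:
--         return "UNKNOWN"
--     signs = set()
--     prev = None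
--     for y in year_values:
--         s = y["salary"]
--         if prev is not None:
--             d = s - prev
--             signs.add(0 if d == 0 else (1 if d > 0 else -1))
--         prev = s
--     if not signs or signs == {0}:
--         return "FLAT"
--     if signs == {1}:
--         return "BL"
--     if signs == {-1}:
--         return "FL"
--     return "RESTRUCTURE"
-- ===== Notes on version B (the rewrite author's own statement) =====
-- stated objective: alternative
-- what changed: Instead of A's three separate all(...) rescans of the salary list (all-equal-to-head, all-increasing, all-decreasing), B makes one pass over consecutive pairs collecting the set of comparison signs {-1,0,1} and classifies the shape from that set.
import Mathlib
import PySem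

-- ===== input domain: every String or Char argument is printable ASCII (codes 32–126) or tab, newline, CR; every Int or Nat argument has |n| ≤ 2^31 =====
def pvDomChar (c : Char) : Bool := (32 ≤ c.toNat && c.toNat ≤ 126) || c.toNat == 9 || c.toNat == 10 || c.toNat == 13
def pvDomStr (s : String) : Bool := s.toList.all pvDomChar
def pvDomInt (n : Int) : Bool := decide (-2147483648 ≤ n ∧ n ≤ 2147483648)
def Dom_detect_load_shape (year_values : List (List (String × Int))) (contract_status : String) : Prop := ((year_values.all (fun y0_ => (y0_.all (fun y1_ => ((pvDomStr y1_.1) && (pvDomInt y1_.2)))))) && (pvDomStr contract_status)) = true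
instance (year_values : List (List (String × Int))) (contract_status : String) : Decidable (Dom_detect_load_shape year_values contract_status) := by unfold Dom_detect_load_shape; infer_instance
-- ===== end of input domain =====

-- B replaces A's three separate all(...) rescans of the salary list by ONE pass that collects
-- the set of comparison signs of consecutive pairs and classifies from that set ("alternative").

-- ===== PORT A =====
-- y["salary"] : first-match association-list lookup; KeyError (missing key) is excluded by Pre_,
-- so the getD default 0 is never consulted on admitted inputs.
def detect_load_shape (year_values : List (List (String × Int))) (contract_status : String) : String :=
  let cs := PySem.Str.upper (PySem.Str.strip contract_status)
  if cs = "BL" then "BL"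
  else if cs = "FL" then "FL"
  else
    let yv := year_values.map (fun y => (PySem.Dict.mk y).getD "salary" 0)
    if yv = [] then "UNKNOWN"
    else if yv.length = 1 ∨ yv.all (fun s => decide (s = PySem.List.pyGetD yv 0 0)) then "FLAT"
    else if (PySem.List.pyRange 0 ((yv.length : Int) - 1) 1).all
        (fun i => decide (PySem.List.pyGetD yv (i + 1) 0 > PySem.List.pyGetD yv i 0)) then "BL"
    else if (PySem.List.pyRange 0 ((yv.length : Int) - 1) 1).all
        (fun i => decide (PySem.List.pyGetD yv (i + 1) 0 < PySem.List.pyGetD yv i 0)) then "FL"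
    else "RESTRUCTURE"

-- ===== PORT B =====
-- sign of a salary difference: 0 if d == 0 else (1 if d > 0 else -1)
def dlsSign (d : Int) : Int := if d = 0 then 0 else if d > 0 then 1 else -1

-- one loop iteration: extract the salary, add the sign vs the previous salary (if any)
def dlsStep (st : Option Int × PySem.Set Int) (y : List (String × Int)) : Option Int × PySem.Set Int :=
  let s := (PySem.Dict.mk y).getD "salary" 0
  match st.1 with
  | none => (some s, st.2)
  | some p => (some s, PySem.Set.add st.2 (dlsSign (s - p)))

def detect_load_shape_alt (year_values : List (List (String × Int))) (contract_status : String) : String :=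
  let cs := PySem.Str.upper (PySem.Str.strip contract_status)
  if cs = "BL" then "BL"
  else if cs = "FL" then "FL"
  else if year_values = [] then "UNKNOWN"
  else
    let signs := (year_values.foldl dlsStep (none, PySem.Set.empty)).2
    if signs = [] ∨ PySem.Set.equal signs [0] then "FLAT"
    else if PySem.Set.equal signs [1] then "BL"
    else if PySem.Set.equal signs [-1] then "FL"
    else "RESTRUCTURE"

-- ===== PRECONDITION & SPEC =====
-- Pre_ excludes exactly the inputs where Python A raises KeyError: a year record without a "salary"
-- key, reached only when the contract-status guard ("BL"/"FL" after strip/upper) does not fire.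
def Pre_detect_load_shape (year_values : List (List (String × Int))) (contract_status : String) : Prop :=
  PySem.Str.upper (PySem.Str.strip contract_status) = "BL" ∨
  PySem.Str.upper (PySem.Str.strip contract_status) = "FL" ∨
  ∀ y ∈ year_values, "salary" ∈ y.map Prod.fst
instance (year_values : List (List (String × Int))) (contract_status : String) : Decidable (Pre_detect_load_shape year_values contract_status) := by unfold Pre_detect_load_shape; infer_instance

def pvWitness_detect_load_shape : (List (List (String × Int))) × String :=
  ([[("salary", 1)], [("salary", 2)], [("salary", 2)]], "active")

def Spec_detect_load_shape (year_values : List (List (String × Int))) (contract_status : String) (out : String) : Prop := out = detect_load_shape_alt year_values contract_status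
instance (year_values : List (List (String × Int))) (contract_status : String) (out : String) : Decidable (Spec_detect_load_shape year_values contract_status out) := by unfold Spec_detect_load_shape; infer_instance

-- ===== CLAIM (what is proved, stated in full; the proofs are below) =====
def Claim_equal_detect_load_shape : Prop := ∀ (year_values : List (List (String × Int))) (contract_status : String), Dom_detect_load_shape year_values contract_status → Pre_detect_load_shape year_values contract_status → Spec_detect_load_shape year_values contract_status (detect_load_shape year_values contract_status)

-- ===== LEMMAS AND PROOFS =====

-- the list of consecutive-pair signs of the salary sequence a :: rest
def signList : Int → List Int → List Int
  | _, [] => []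
  | a, b :: t => dlsSign (b - a) :: signList b t

-- the salary extraction both ports perform
def dlsSal (y : List (String × Int)) : Int := (PySem.Dict.mk y).getD "salary" 0

theorem dlsStep_foldl (ys : List (List (String × Int))) (a : Int) (s : PySem.Set Int) :
    (ys.foldl dlsStep (some a, s)).2 = (signList a (ys.map dlsSal)).foldl PySem.Set.add s := by
  induction ys generalizing a s with
  | nil => rfl
  | cons y t ih => simpa [dlsStep, signList, dlsSal] using ih (dlsSal y) _

theorem signs_eq (y : List (String × Int)) (ys : List (List (String × Int))) :
    ((y :: ys).foldl dlsStep (none, PySem.Set.empty)).2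
      = PySem.Set.ofList (signList (dlsSal y) (ys.map dlsSal)) := by
  rw [PySem.Set.ofList_eq_foldl]
  simpa [dlsStep, dlsSal] using dlsStep_foldl ys (dlsSal y) PySem.Set.empty

theorem ofList_eq_nil_iff {l : List Int} : PySem.Set.ofList l = [] ↔ l = [] := by
  cases l with
  | nil => simp
  | cons x t => simp [PySem.Set.ofList_cons]

theorem equal_singleton_iff (l : List Int) (c : Int) :
    PySem.Set.equal (PySem.Set.ofList l) [c] = true ↔ (l ≠ [] ∧ ∀ x ∈ l, x = c) := by
  rw [PySem.Set.equal_iff]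
  constructor
  · intro h
    constructor
    · intro hl; subst hl; simpa using (h c).2
    · intro x hx; simpa using (h x).1 (by simpa [PySem.Set.mem_ofList] using hx)
  · rintro ⟨hne, hall⟩ x
    simp only [PySem.Set.mem_ofList, List.mem_singleton]
    constructor
    · exact hall x
    · rintro rfl
      cases l with
      | nil => exact absurd rfl hne
      | cons a t => have := hall a (by simp); simpa [← this] using List.mem_cons_self (l := t) (a := a)

-- chain characterisation of "all consecutive signs are c"
theorem chain_signList (Q : Int → Int → Prop) (c : Int)
    (hc : ∀ u v, dlsSign (v - u) = c ↔ Q u v) :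
    ∀ (rest : List Int) (a : Int), (List.IsChain Q (a :: rest) ↔ ∀ x ∈ signList a rest, x = c) := by
  intro rest
  induction rest with
  | nil => intro a; simp [signList]
  | cons b t ih =>
    intro a
    rw [List.isChain_cons_cons]
    simp only [signList, List.mem_cons, forall_eq_or_imp]
    rw [ih b, hc a b]

theorem sign_zero_iff (u v : Int) : dlsSign (v - u) = 0 ↔ u = v := by
  unfold dlsSign; split_ifs <;> simp <;> omega

theorem sign_one_iff (u v : Int) : dlsSign (v - u) = 1 ↔ u < v := by
  unfold dlsSign; split_ifs <;> simp <;> omega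

theorem sign_neg_one_iff (u v : Int) : dlsSign (v - u) = -1 ↔ v < u := by
  unfold dlsSign; split_ifs <;> simp <;> omega

-- A's all-equal-to-head scan as a chain
theorem forall_eq_head : ∀ (rest : List Int) (a : Int),
    ((∀ s ∈ a :: rest, s = a) ↔ List.IsChain (fun u v => u = v) (a :: rest)) := by
  intro rest
  induction rest with
  | nil => intro a; simp
  | cons b t ih =>
    intro a
    rw [List.isChain_cons_cons, ← ih b]
    constructor
    · intro h
      have hb : b = a := h b (by simp)
      subst hb
      refine ⟨rfl, fun s hs => ?_⟩
      rcases List.mem_cons.1 hs with rfl | hs'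
      · rfl
      · exact h s (by simp [hs'])
    · rintro ⟨hab, h⟩ s hs
      rcases List.mem_cons.1 hs with rfl | hs'
      · rfl
      · exact (h s hs').trans hab.symm

-- A's index scan over range(len(yv)-1) as a chain
theorem range_all_iff (yv : List Int) (P : Int → Int → Prop) [DecidableRel P] :
    ((PySem.List.pyRange 0 ((yv.length : Int) - 1) 1).all
        (fun i => decide (P (PySem.List.pyGetD yv (i + 1) 0) (PySem.List.pyGetD yv i 0))) = true)
      ↔ List.IsChain (fun u v => P v u) yv := by
  rw [List.isChain_iff_getElem]
  rcases Nat.eq_zero_or_pos yv.length with h0 | hpos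
  · rw [PySem.List.pyRange_one_eq_nil (by omega)]
    simp only [List.all_nil, true_iff]
    intro i hi; omega
  · have hlen : ((yv.length : Int) - 1) = ((yv.length - 1 : Nat) : Int) := by omega
    rw [hlen, PySem.List.pyRange_zero_nat]
    simp only [List.all_map, List.all_eq_true, List.mem_range, Function.comp]
    constructor
    · intro h i hi
      have := h i (by omega)
      have h1 : ((i : Int) + 1) = ((i + 1 : Nat) : Int) := by push_cast; ring
      rw [h1, PySem.List.pyGetD_natCast, PySem.List.pyGetD_natCast] at this
      simp only [decide_eq_true_eq] at this
      rwa [List.getD_eq_getElem _ _ (by omega), List.getD_eq_getElem _ _ (by omega)] at this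
    · intro h i hi
      have h1 : ((i : Int) + 1) = ((i + 1 : Nat) : Int) := by push_cast; ring
      rw [h1, PySem.List.pyGetD_natCast, PySem.List.pyGetD_natCast]
      simp only [decide_eq_true_eq]
      rw [List.getD_eq_getElem _ _ (by omega), List.getD_eq_getElem _ _ (by omega)]
      exact h i (by omega)

-- core: A's four-way classification of yv = a :: rest equals B's classification of the sign set
theorem dls_tail (a : Int) (rest : List Int) :
    (if (a :: rest).length = 1 ∨ ((a :: rest).all fun s => decide (s = PySem.List.pyGetD (a :: rest) 0 0)) = true then "FLAT"
     else if ((PySem.List.pyRange 0 (((a :: rest).length : Int) - 1) 1).all fun i =>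
         decide (PySem.List.pyGetD (a :: rest) (i + 1) 0 > PySem.List.pyGetD (a :: rest) i 0)) = true then "BL"
     else if ((PySem.List.pyRange 0 (((a :: rest).length : Int) - 1) 1).all fun i =>
         decide (PySem.List.pyGetD (a :: rest) (i + 1) 0 < PySem.List.pyGetD (a :: rest) i 0)) = true then "FL"
     else "RESTRUCTURE")
    = (if PySem.Set.ofList (signList a rest) = [] ∨ PySem.Set.equal (PySem.Set.ofList (signList a rest)) [0] = true then "FLAT"
       else if PySem.Set.equal (PySem.Set.ofList (signList a rest)) [1] = true then "BL"
       else if PySem.Set.equal (PySem.Set.ofList (signList a rest)) [-1] = true then "FL"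
       else "RESTRUCTURE") := by
  have hhead : PySem.List.pyGetD (a :: rest) 0 0 = a := by simp [PySem.List.pyGetD]
  have hflatA : ((a :: rest).length = 1 ∨
      ((a :: rest).all fun s => decide (s = PySem.List.pyGetD (a :: rest) 0 0)) = true)
      ↔ ∀ x ∈ signList a rest, x = 0 := by
    rw [hhead]
    constructor
    · rintro (hl | hall)
      · cases rest with
        | nil => intro x hx; simp [signList] at hx
        | cons b t => simp at hl
      · refine (chain_signList _ 0 sign_zero_iff rest a).1 ((forall_eq_head rest a).1 ?_)
        simpa using hall
    · intro h
      right
      simpa using (forall_eq_head rest a).2 ((chain_signList _ 0 sign_zero_iff rest a).2 h)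
  have hblA : (((PySem.List.pyRange 0 (((a :: rest).length : Int) - 1) 1).all fun i =>
      decide (PySem.List.pyGetD (a :: rest) (i + 1) 0 > PySem.List.pyGetD (a :: rest) i 0)) = true)
      ↔ ∀ x ∈ signList a rest, x = 1 := by
    rw [range_all_iff (a :: rest) (· > ·)]
    exact chain_signList _ 1 sign_one_iff rest a
  have hflA : (((PySem.List.pyRange 0 (((a :: rest).length : Int) - 1) 1).all fun i =>
      decide (PySem.List.pyGetD (a :: rest) (i + 1) 0 < PySem.List.pyGetD (a :: rest) i 0)) = true)
      ↔ ∀ x ∈ signList a rest, x = -1 := by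
    rw [range_all_iff (a :: rest) (· < ·)]
    exact chain_signList _ (-1) sign_neg_one_iff rest a
  have hflatB : (PySem.Set.ofList (signList a rest) = [] ∨
      PySem.Set.equal (PySem.Set.ofList (signList a rest)) [0] = true)
      ↔ ∀ x ∈ signList a rest, x = 0 := by
    rw [ofList_eq_nil_iff, equal_singleton_iff]
    constructor
    · rintro (h | ⟨-, h⟩)
      · intro x hx; rw [h] at hx; simp at hx
      · exact h
    · intro h
      cases hLe : signList a rest with
      | nil => exact Or.inl rfl
      | cons x t => exact Or.inr ⟨by simp, fun z hz => h z (hLe ▸ hz)⟩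
  by_cases c0 : ∀ x ∈ signList a rest, x = 0
  · rw [if_pos (hflatA.2 c0), if_pos (hflatB.2 c0)]
  · rw [if_neg (fun h => c0 (hflatA.1 h)), if_neg (fun h => c0 (hflatB.1 h))]
    have hLne : signList a rest ≠ [] := by
      intro h; exact c0 (fun x hx => by rw [h] at hx; simp at hx)
    by_cases c1 : ∀ x ∈ signList a rest, x = 1
    · rw [if_pos (hblA.2 c1), if_pos ((equal_singleton_iff _ 1).2 ⟨hLne, c1⟩)]
    · rw [if_neg (fun h => c1 (hblA.1 h)),
          if_neg (fun h => c1 ((equal_singleton_iff _ 1).1 h).2)]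
      by_cases cm : ∀ x ∈ signList a rest, x = -1
      · rw [if_pos (hflA.2 cm), if_pos ((equal_singleton_iff _ (-1)).2 ⟨hLne, cm⟩)]
      · rw [if_neg (fun h => cm (hflA.1 h)),
            if_neg (fun h => cm ((equal_singleton_iff _ (-1)).1 h).2)]

-- ===== VERDICT (by name: the statement is the Claim_ definition above) =====
theorem detect_load_shape_spec : Claim_equal_detect_load_shape := by
  intro year_values contract_status _ _
  unfold Spec_detect_load_shape detect_load_shape detect_load_shape_alt
  by_cases h1 : PySem.Str.upper (PySem.Str.strip contract_status) = "BL"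
  · simp [h1]
  by_cases h2 : PySem.Str.upper (PySem.Str.strip contract_status) = "FL"
  · simp [h2]
  simp only [if_neg h1, if_neg h2]
  cases year_values with
  | nil => simp
  | cons y ys =>
    rw [signs_eq]
    simp only [List.map_cons, reduceCtorEq, if_false]
    exact dls_tail (dlsSal y) (ys.map dlsSal)
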